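-- pv_equiv track=rewrite | github.com/irisapei/Mahjong | hu.py | countsPeng
-- ===== SOURCE A (Python) =====
-- def countsPeng(hand):
--     seen = set()
--     counter = 0
--     for i in hand:
--         if hand.count(i) == 3:
--             seen.add(i)
--     for j in seen:
--         if hand.count(j) == 3:
--             counter+=3
--     return counter
-- ===== SOURCE B (Python) =====
-- def countsPeng(hand):
--     total = 0
--     prev = None
--     run = 0
--     for x in sorted(hand):
--         if x == prev:
--             run += 1
--         else:
--             if run == 3:
--                 total += 3
--             prev = x
--             run = 1
--     if run == 3:
--         total += 3
--     return total
-- ===== Notes on version B (the rewrite author's own statement) =====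
-- stated objective: faster
-- what changed: Sorts a copy of the hand and makes one run-length scan, adding 3 whenever a finished run has length exactly 3, instead of A's repeated hand.count scans over the hand and a seen-set.
import Mathlib
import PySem

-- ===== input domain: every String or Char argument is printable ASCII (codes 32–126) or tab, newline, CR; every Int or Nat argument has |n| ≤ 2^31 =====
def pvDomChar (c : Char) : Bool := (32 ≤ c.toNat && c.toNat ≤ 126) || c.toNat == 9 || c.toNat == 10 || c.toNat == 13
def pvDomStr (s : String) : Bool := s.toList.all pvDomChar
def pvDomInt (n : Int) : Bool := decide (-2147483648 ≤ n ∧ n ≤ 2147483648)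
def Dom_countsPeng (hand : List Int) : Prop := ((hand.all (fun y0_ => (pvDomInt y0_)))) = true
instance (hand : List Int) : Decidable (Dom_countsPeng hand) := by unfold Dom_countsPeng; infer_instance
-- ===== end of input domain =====

-- B sorts a copy of the hand and makes one run-length scan (add 3 per run of length exactly 3)
-- instead of A's repeated hand.count scans; equivalence proved below.

-- ===== PORT A =====
def countsPeng (hand : List Int) : Int :=
  let seen : PySem.Set Int :=
    hand.foldl (fun s i => if PySem.List.count hand i = 3 then PySem.Set.add s i else s)
      PySem.Set.empty
  seen.foldl (fun counter j => if PySem.List.count hand j = 3 then counter + 3 else counter) 0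

-- ===== PORT B =====
-- loop body of Source B: state = (total, prev, run)
def pvStep (st : Int × Option Int × Int) (x : Int) : Int × Option Int × Int :=
  if some x = st.2.1 then (st.1, st.2.1, st.2.2 + 1)
  else ((if st.2.2 = 3 then st.1 + 3 else st.1), some x, 1)

def countsPeng_alt (hand : List Int) : Int :=
  let s := (PySem.List.sorted hand (fun x => x) false).foldl pvStep (0, none, 0)
  if s.2.2 = 3 then s.1 + 3 else s.1

-- ===== PRECONDITION & SPEC =====
def Spec_countsPeng (hand : List Int) (out : Int) : Prop := out = countsPeng_alt hand
instance (hand : List Int) (out : Int) : Decidable (Spec_countsPeng hand out) := by unfold Spec_countsPeng; infer_instance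

-- ===== CLAIM (what is proved, stated in full; the proofs are below) =====
def Claim_equal_countsPeng : Prop := ∀ (hand : List Int), Dom_countsPeng hand → Spec_countsPeng hand (countsPeng hand)

-- ===== LEMMAS AND PROOFS =====

-- Common value both programs compute: 3 per distinct element of m occurring exactly 3 times in m.
def pvG (m : List Int) : Int :=
  3 * ((m.toFinset.filter (fun i => List.count i m = 3)).card : Int)

lemma pvG_perm {l1 l2 : List Int} (h : l1.Perm l2) : pvG l1 = pvG l2 := by
  have ht : l1.toFinset = l2.toFinset := by
    ext i; simp [List.mem_toFinset, h.mem_iff]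
  have hf : l1.toFinset.filter (fun i => List.count i l1 = 3)
      = l2.toFinset.filter (fun i => List.count i l2 = 3) := by
    rw [ht]
    exact Finset.filter_congr (fun i _ => by rw [h.count_eq])
  unfold pvG
  rw [hf]

lemma count_filter_ne (x i : Int) (t : List Int) (h : i ≠ x) :
    List.count i (t.filter (fun j => j != x)) = List.count i t := by
  apply List.count_filter
  simpa using h

-- recursion for pvG on a cons cell, peeling off all copies of the head
lemma pvG_cons (x : Int) (t : List Int) :
    pvG (x :: t) = (if List.count x (x :: t) = 3 then 3 else 0)
      + pvG (t.filter (fun j => j != x)) := by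
  unfold pvG
  have hS : (x :: t).toFinset.filter (fun i => List.count i (x :: t) = 3)
      = (if List.count x (x :: t) = 3 then ({x} : Finset Int) else ∅)
        ∪ ((t.filter (fun j => j != x)).toFinset.filter
            (fun i => List.count i (t.filter (fun j => j != x)) = 3)) := by
    ext i
    by_cases hix : i = x
    · subst hix
      have hnot : i ∉ (t.filter (fun j => j != i)).toFinset := by
        simp [List.mem_toFinset, List.mem_filter]
      simp only [Finset.mem_union, Finset.mem_filter, List.mem_toFinset, List.mem_cons]
      constructor
      · rintro ⟨-, hc⟩
        left; simp [hc]
      · rintro (h1 | h2)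
        · by_cases hc : List.count i (i :: t) = 3
          · exact ⟨Or.inl trivial, hc⟩
          · rw [if_neg hc] at h1; exact absurd h1 (by simp)
        · exact absurd h2.1 (by simpa [List.mem_toFinset] using hnot)
    · have hcnt : List.count i (x :: t) = List.count i t := List.count_cons_of_ne (Ne.symm hix)
      have hcf : List.count i (t.filter (fun j => j != x)) = List.count i t :=
        count_filter_ne x i t hix
      simp only [Finset.mem_union, Finset.mem_filter, List.mem_toFinset, List.mem_cons,
        List.mem_filter, hcnt, hcf]
      constructor
      · rintro ⟨hm, hc⟩
        right
        refine ⟨⟨?_, by simpa using hix⟩, hc⟩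
        rcases hm with h | h
        · exact absurd h hix
        · exact h
      · rintro (h1 | h2)
        · exfalso; split at h1 <;> simp_all
        · exact ⟨Or.inr h2.1.1, h2.2⟩
  rw [hS]
  have hdisj : Disjoint (if List.count x (x :: t) = 3 then ({x} : Finset Int) else ∅)
      ((t.filter (fun j => j != x)).toFinset.filter
        (fun i => List.count i (t.filter (fun j => j != x)) = 3)) := by
    split
    · simp [Finset.disjoint_left, List.mem_filter]
    · simp
  rw [Finset.card_union_of_disjoint hdisj]
  split <;> simp <;> ring

-- the run-length loop, followed by the final flush
def pvB (l : List Int) (st : Int × Option Int × Int) : Int :=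
  let s := l.foldl pvStep st
  if s.2.2 = 3 then s.1 + 3 else s.1

-- loop invariant: mid-run on value a (run length r so far), remaining sorted suffix l with a ≤ everything
lemma pvB_some (l : List Int) (a total r : Int)
    (hs : l.Pairwise (fun p q => p ≤ q)) (ha : ∀ x ∈ l, a ≤ x) :
    pvB l (total, some a, r)
      = total + (if r + (List.count a l : Int) = 3 then 3 else 0)
          + pvG (l.filter (fun j => j != a)) := by
  induction l generalizing a total r with
  | nil =>
    simp only [pvB, List.foldl_nil, List.filter_nil, List.count_nil]
    unfold pvG
    split <;> split <;> simp_all <;> omega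
  | cons x t ih =>
    have hxt : ∀ y ∈ t, x ≤ y := fun y hy => (List.pairwise_cons.mp hs).1 y hy
    have ht : t.Pairwise (fun p q => p ≤ q) := (List.pairwise_cons.mp hs).2
    by_cases hxa : x = a
    · subst hxa
      have hstep : pvStep (total, some x, r) x = (total, some x, r + 1) := by
        simp [pvStep]
      have : pvB (x :: t) (total, some x, r) = pvB t (total, some x, r + 1) := by
        simp [pvB, hstep]
      rw [this, ih x total (r + 1) ht hxt]
      have hcnt : List.count x (x :: t) = List.count x t + 1 := by
        simp [List.count_cons]
      have hfil : (x :: t).filter (fun j => j != x) = t.filter (fun j => j != x) := by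
        simp
      have hcond : ((r + 1) + (List.count x t : Int) = 3)
          ↔ (r + ((List.count x t + 1 : ℕ) : Int) = 3) := by push_cast; omega
      rw [hcnt, hfil]
      simp only [hcond]
    · have hax : a < x := lt_of_le_of_ne (ha x (by simp)) (Ne.symm hxa)
      have hstep : pvStep (total, some a, r) x
          = ((if r = 3 then total + 3 else total), some x, 1) := by
        simp [pvStep, Option.some_inj, hxa]
      have hrec : pvB (x :: t) (total, some a, r)
          = pvB t ((if r = 3 then total + 3 else total), some x, 1) := by
        simp [pvB, hstep]
      rw [hrec, ih x _ 1 ht hxt]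
      have hanot : a ∉ x :: t := by
        intro hmem
        rcases List.mem_cons.mp hmem with h | h
        · exact hxa h.symm
        · exact absurd (hxt a h) (not_le.mpr hax)
      have hcnt0 : List.count a (x :: t) = 0 := List.count_eq_zero.mpr hanot
      have hfil : (x :: t).filter (fun j => j != a) = x :: t := by
        apply List.filter_eq_self.mpr
        intro b hb
        simp only [bne_iff_ne, ne_eq]
        intro hba
        exact hanot (hba ▸ hb)
      rw [hcnt0, hfil, pvG_cons x t]
      have hcond : ((1 : Int) + (List.count x t : Int) = 3)
          ↔ (List.count x (x :: t) = 3) := by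
        simp [List.count_cons]; omega
      simp only [hcond]
      generalize pvG (t.filter (fun j => j != x)) = G
      split_ifs <;> push_cast <;> ring_nf <;> omega

lemma B_eq_pvG (hand : List Int) : countsPeng_alt hand = pvG hand := by
  have hperm := PySem.List.sorted_perm hand (fun x => x) false
  have hpw := PySem.List.sorted_pairwise hand (fun x => x)
  cases hsort : PySem.List.sorted hand (fun x => x) false with
  | nil =>
    have : hand = [] := (hsort ▸ hperm).symm.eq_nil
    subst this
    simp [countsPeng_alt, hsort, pvG]
  | cons x t =>
    rw [hsort] at hperm hpw
    have hstep : pvStep (0, none, 0) x = (0, some x, 1) := by simp [pvStep]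
    have hB : countsPeng_alt hand = pvB t (0, some x, 1) := by
      simp [countsPeng_alt, hsort, pvB, hstep]
    rw [hB, pvB_some t x 0 1 (List.pairwise_cons.mp hpw).2 (List.pairwise_cons.mp hpw).1]
    have hcond : ((1 : Int) + (List.count x t : Int) = 3)
        ↔ (List.count x (x :: t) = 3) := by
      simp [List.count_cons]; omega
    rw [← pvG_perm hperm, pvG_cons x t]
    simp only [hcond]
    ring

-- ===== A side =====

-- A's first loop builds exactly the set of elements of hand whose count is 3.
lemma seen_eq_ofList_filter (hand : List Int) :
    hand.foldl (fun s i => if PySem.List.count hand i = 3 then PySem.Set.add s i else s)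
      PySem.Set.empty
    = PySem.Set.ofList (hand.filter (fun i => PySem.List.count hand i == 3)) := by
  rw [PySem.Set.ofList_eq_foldl, List.foldl_filter]
  simp only [beq_iff_eq, PySem.Set.empty]

-- A's second loop adds 3 per element, since every element it visits has count 3.
lemma foldl_add3_of_all (hand l : List Int) (h : ∀ j ∈ l, PySem.List.count hand j = 3) (c : Int) :
    l.foldl (fun c j => if PySem.List.count hand j = 3 then c + 3 else c) c
    = c + 3 * l.length := by
  induction l generalizing c with
  | nil => simp
  | cons x xs ih =>
    simp only [List.foldl_cons, h x (by simp), if_pos, List.length_cons]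
    rw [ih (fun j hj => h j (by simp [hj]))]
    push_cast; ring

lemma A_eq_pvG (hand : List Int) : countsPeng hand = pvG hand := by
  unfold countsPeng
  rw [seen_eq_ofList_filter]
  have hall : ∀ j ∈ (PySem.Set.ofList (hand.filter (fun i => PySem.List.count hand i == 3)) : List Int),
      PySem.List.count hand j = 3 := by
    intro j hj
    have := (PySem.Set.mem_ofList _ _).mp hj
    simpa using (List.mem_filter.mp this).2
  rw [foldl_add3_of_all hand _ hall]
  have hlen : (PySem.Set.ofList (hand.filter (fun i => PySem.List.count hand i == 3)) : List Int).length
      = (hand.toFinset.filter (fun i => List.count i hand = 3)).card := by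
    rw [← List.toFinset_card_of_nodup (PySem.Set.nodup_ofList _)]
    congr 1
    ext i
    simp [List.mem_toFinset, PySem.Set.mem_ofList, List.mem_filter, Finset.mem_filter,
      PySem.List.count_eq]
  rw [hlen]
  unfold pvG
  ring

-- ===== VERDICT (by name: the statement is the Claim_ definition above) =====
theorem countsPeng_spec : Claim_equal_countsPeng := by
  intro hand _
  unfold Spec_countsPeng
  rw [A_eq_pvG, B_eq_pvG]
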